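-- pv_equiv track=rewrite | github.com/Ashiq-am/Path-of-Python | 3.Data Types/Arrays Set 1 and Set 2/Prefix Sum/Kth non-overlapping Substring of length M after sorting given String lexicographically/Example 2.py | getKthString
-- ===== SOURCE A (Python) =====
-- def getKthString(N, M, K, str):
--     a = [0] * 26
--
--     ## Storing the frequency of all the characters
--     for i in range(N):
--         a[ord(str[i]) - ord('a')] += 1
--
--     ## Prefix array
--     prefix = [0] * 26
--     prefix[0] = a[0]
--     for i in range(1, 26):
--         prefix[i] = prefix[i - 1] + a[i]
--
--     ## Get the starting index of the kth
--     ## lexicographically string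
--     startingIndex = (K - 1) * M
--     var = 0
--
--     ## To track the size of string
--     size = 0
--
--     kthString = ""
--
--     for i in range(26):
--
--         ## Prefix array is smaller than
--         ## startingIndex or element is not present
--         if (prefix[i] < startingIndex or a[i] == 0):
--             continue
--         ## This case is when prefix array
--         ## exceeds the startingIndex for
--         ## the first time
--         elif (var == 0):
--             var = prefix[i] - startingIndex;
--             for j in range(var):
--                 kthString += chr(97 + i)
--                 size += 1
--                 if (size == M):
--                     break
--         ## Prefix array exceeding startingIndex
--         ## other than first time
--         else:
--             for j in range(prefix[i] - prefix[i - 1]):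
--                 kthString += chr(97 + i);
--                 size += 1
--                 if (size == M):
--                     break
--         ## Breaking from the loop if we
--         ## get the string of M size
--         if (size == M):
--             break
--
--     ## Return the resultant string
--     return kthString
-- ===== SOURCE B (Python) =====
-- def getKthString(N, M, K, str):
--     a = [0] * 26
--     for i in range(N):
--         a[ord(str[i]) - ord('a')] += 1
--     s = ''.join(chr(97 + i) * a[i] for i in range(26))
--     start = (K - 1) * M
--     return s[start:start + M]
-- ===== Notes on version B (the rewrite author's own statement) =====
-- stated objective: simpler
-- what changed: B keeps A's frequency count but drops the prefix-sum table and the stateful 26-way walk with inner char-appending loops, instead materialising the whole sorted string once and returning the plain slice s[(K-1)*M : (K-1)*M + M]; Pre_ excludes the corner K <= 0 or M <= 0 with 0 < N and (K-1)*M < N, an unspecified corner (no K-th substring of length M exists) on which A's walk and B's plain slice are two equally defensible answers.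
-- outside the precondition, e.g. on getKthString(3, 2, 0, 'abc'): A returns 'aa', B returns ''; on getKthString(3, 0, 2, 'abc'): A returns 'abc', B returns ''
import Mathlib
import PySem

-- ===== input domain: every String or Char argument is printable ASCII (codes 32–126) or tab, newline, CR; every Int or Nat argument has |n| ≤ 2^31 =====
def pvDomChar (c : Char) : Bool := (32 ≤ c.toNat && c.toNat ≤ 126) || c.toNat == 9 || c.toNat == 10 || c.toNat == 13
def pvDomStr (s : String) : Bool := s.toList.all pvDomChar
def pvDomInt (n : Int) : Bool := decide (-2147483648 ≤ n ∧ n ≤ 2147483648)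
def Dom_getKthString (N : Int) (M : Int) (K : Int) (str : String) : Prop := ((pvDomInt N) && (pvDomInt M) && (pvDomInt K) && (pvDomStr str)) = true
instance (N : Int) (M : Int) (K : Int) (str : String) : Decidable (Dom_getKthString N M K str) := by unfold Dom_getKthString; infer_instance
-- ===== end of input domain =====

-- B rebuilds the sorted string once and returns the plain slice s[(K-1)*M : (K-1)*M + M],
-- dropping A's prefix-sum table and its stateful 26-way walk with inner appending loops (objective: simpler).

-- ===== PORT A =====
-- inner 'for j in range(...)' loop of A (appends the char, counts size, breaks at size == M)
def getKthStringInner (js : List Int) (ch : Char) (M : Int) (size : Int) (acc : List Char) :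
    Int × List Char :=
  match js with
  | [] => (size, acc)
  | _ :: rest =>
    let acc' := acc ++ [ch]
    let size' := size + 1
    if size' = M then (size', acc') else getKthStringInner rest ch M size' acc'

-- outer 'for i in range(26)' loop of A (with 'continue' and the trailing 'if size == M: break')
def getKthStringLoop (is : List Int) (pre a : List Int) (st M var size : Int)
    (acc : List Char) : List Char :=
  match is with
  | [] => acc
  | i :: rest =>
    if PySem.List.pyGetD pre i 0 < st ∨ PySem.List.pyGetD a i 0 = 0 then
      getKthStringLoop rest pre a st M var size acc
    else if var = 0 then
      let var' := PySem.List.pyGetD pre i 0 - st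
      let r := getKthStringInner (PySem.List.pyRange 0 var' 1) (Char.ofNat (97 + i).toNat) M size acc
      if r.1 = M then r.2 else getKthStringLoop rest pre a st M var' r.1 r.2
    else
      let r := getKthStringInner
          (PySem.List.pyRange 0 (PySem.List.pyGetD pre i 0 - PySem.List.pyGetD pre (i - 1) 0) 1)
          (Char.ofNat (97 + i).toNat) M size acc
      if r.1 = M then r.2 else getKthStringLoop rest pre a st M var r.1 r.2

def getKthString (N : Int) (M : Int) (K : Int) (str : String) : String :=
  let a : List Int := (PySem.List.pyRange 0 N 1).foldl
      (fun acc i =>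
        let idx : Int := (((PySem.Str.pyGet? str i).getD ' ').toNat : Int) - 97
        PySem.List.pySetD acc idx (PySem.List.pyGetD acc idx 0 + 1))
      (List.replicate 26 (0 : Int))
  let pre : List Int := (PySem.List.pyRange 1 26 1).foldl
      (fun p i => PySem.List.pySetD p i (PySem.List.pyGetD p (i - 1) 0 + PySem.List.pyGetD a i 0))
      (PySem.List.pySetD (List.replicate 26 (0 : Int)) 0 (PySem.List.pyGetD a 0 0))
  let startingIndex : Int := (K - 1) * M
  String.ofList (getKthStringLoop (PySem.List.pyRange 0 26 1) pre a startingIndex M 0 0 [])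

-- ===== PORT B =====
def getKthString_alt (N : Int) (M : Int) (K : Int) (str : String) : String :=
  let a : List Int := (PySem.List.pyRange 0 N 1).foldl
      (fun acc i =>
        let idx : Int := (((PySem.Str.pyGet? str i).getD ' ').toNat : Int) - 97
        PySem.List.pySetD acc idx (PySem.List.pyGetD acc idx 0 + 1))
      (List.replicate 26 (0 : Int))
  let s : List Char := ((PySem.List.pyRange 0 26 1).map
      (fun i => List.replicate (PySem.List.pyGetD a i 0).toNat (Char.ofNat (97 + i).toNat))).flatten
  let start : Int := (K - 1) * M
  String.ofList (PySem.List.slice s (some start) (some (start + M)))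

-- ===== PRECONDITION & SPEC =====
-- Pre_ excludes (a) the inputs where A raises (N > len(str), or a scanned character below chr(71)
-- or above 'z', whose table index falls outside Python's negative-wrap range), and (b) the corner
-- K <= 0 or M <= 0 with 0 < N and (K-1)*M < N: no K-th substring of length M exists there, the
-- behaviour is unspecified, and A's walk and B's plain slice are two equally defensible answers.
def Pre_getKthString (N : Int) (M : Int) (K : Int) (str : String) : Prop :=
  N ≤ (str.toList.length : Int) ∧
    (str.toList.take N.toNat).all (fun c => 71 ≤ c.toNat && c.toNat ≤ 122) = true ∧
    ((1 ≤ K ∧ 1 ≤ M) ∨ N ≤ 0 ∨ N < (K - 1) * M)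
instance (N : Int) (M : Int) (K : Int) (str : String) : Decidable (Pre_getKthString N M K str) := by
  unfold Pre_getKthString; infer_instance

def pvWitness_getKthString : Int × Int × Int × String := (3, 2, 1, "cba")

def Spec_getKthString (N : Int) (M : Int) (K : Int) (str : String) (out : String) : Prop :=
  out = getKthString_alt N M K str
instance (N : Int) (M : Int) (K : Int) (str : String) (out : String) :
    Decidable (Spec_getKthString N M K str out) := by unfold Spec_getKthString; infer_instance

-- ===== CLAIM (what is proved, stated in full; the proofs are below) =====
def Claim_equal_getKthString : Prop := ∀ (N : Int) (M : Int) (K : Int) (str : String),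
  Dom_getKthString N M K str → Pre_getKthString N M K str →
    Spec_getKthString N M K str (getKthString N M K str)

-- ===== LEMMAS AND PROOFS =====

-- the run of char (97+i) in the sorted string (exactly B's map function)
def pvRun (C : List Int) (i : Int) : List Char :=
  List.replicate (PySem.List.pyGetD C i 0).toNat (Char.ofNat (97 + i).toNat)

-- the sorted string from index j on
def pvS (C : List Int) (j : Int) : List Char :=
  ((PySem.List.pyRange j 26 1).map (pvRun C)).flatten

-- prefix sums of the counts
def pvP (C : List Int) (j : Nat) : Int := (C.take j).sum

lemma pvP_succ (C : List Int) (i : Nat) (h : i < C.length) :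
    pvP C (i + 1) = pvP C i + C.getD i 0 := by
  unfold pvP
  rw [List.take_add_one, List.sum_append, List.getD_eq_getElem?_getD,
    List.getElem?_eq_getElem h]
  simp

lemma mem_pySetD {xs : List Int} {i v x : Int} (h : x ∈ PySem.List.pySetD xs i v) :
    x ∈ xs ∨ x = v := by
  unfold PySem.List.pySetD PySem.List.pySet? at h
  cases hk : PySem.List.pyIdx? xs.length i with
  | none => rw [hk] at h; simp at h; exact Or.inl h
  | some k => rw [hk] at h; simp at h; exact List.mem_or_eq_of_mem_set h

lemma pyGetD_nonneg {xs : List Int} {i : Int} (hpos : ∀ x ∈ xs, 0 ≤ x) :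
    0 ≤ PySem.List.pyGetD xs i 0 := by
  unfold PySem.List.pyGetD
  cases hg : PySem.List.pyGet? xs i with
  | none => simp
  | some y => simpa using hpos y (PySem.List.mem_of_pyGet?_eq_some xs hg)

lemma counts_length_nonneg (l : List Int) (str : String) (init : List Int)
    (h26 : init.length = 26) (hpos : ∀ x ∈ init, 0 ≤ x) :
    (l.foldl (fun acc i =>
        let idx : Int := (((PySem.Str.pyGet? str i).getD ' ').toNat : Int) - 97
        PySem.List.pySetD acc idx (PySem.List.pyGetD acc idx 0 + 1)) init).length = 26 ∧
    ∀ x ∈ (l.foldl (fun acc i =>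
        let idx : Int := (((PySem.Str.pyGet? str i).getD ' ').toNat : Int) - 97
        PySem.List.pySetD acc idx (PySem.List.pyGetD acc idx 0 + 1)) init), 0 ≤ x := by
  induction l generalizing init with
  | nil => exact ⟨h26, hpos⟩
  | cons y rest ih =>
    simp only [List.foldl_cons]
    refine ih _ ?_ ?_
    · rw [PySem.List.length_pySetD]; exact h26
    · intro x hx
      rcases mem_pySetD hx with h | h
      · exact hpos x h
      · have := pyGetD_nonneg (i := (((PySem.Str.pyGet? str y).getD ' ').toNat : Int) - 97) hpos
        omega

lemma prefix_gen (C : List Int) (h26 : C.length = 26) :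
    ∀ (m : Nat), 1 ≤ m → m ≤ 26 →
      ((PySem.List.pyRange 1 (m : Int) 1).foldl
        (fun p i => PySem.List.pySetD p i
          (PySem.List.pyGetD p (i - 1) 0 + PySem.List.pyGetD C i 0))
        (PySem.List.pySetD (List.replicate 26 (0 : Int)) 0 (PySem.List.pyGetD C 0 0))).length = 26 ∧
      ∀ i : Nat, i < m →
        PySem.List.pyGetD ((PySem.List.pyRange 1 (m : Int) 1).foldl
          (fun p i => PySem.List.pySetD p i
            (PySem.List.pyGetD p (i - 1) 0 + PySem.List.pyGetD C i 0))
          (PySem.List.pySetD (List.replicate 26 (0 : Int)) 0 (PySem.List.pyGetD C 0 0)))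
          (i : Int) 0 = pvP C (i + 1) := by
  intro m
  induction m with
  | zero => intro h; omega
  | succ m ih =>
    intro _ hle
    by_cases hm : m = 0
    · subst hm
      rw [show ((1:Nat) : Int) = 1 by norm_num, PySem.List.pyRange_one_eq_nil le_rfl]
      simp only [List.foldl_nil]
      have hset : PySem.List.pySetD (List.replicate 26 (0 : Int)) 0 (PySem.List.pyGetD C 0 0)
          = (List.replicate 26 (0 : Int)).set 0 (PySem.List.pyGetD C 0 0) := by
        rw [show (0:Int) = ((0:Nat):Int) by norm_num, PySem.List.pySetD_natCast]
      refine ⟨by rw [hset]; simp, ?_⟩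
      intro i hi
      have hi0 : i = 0 := by omega
      subst hi0
      rw [hset, show ((0:Nat) : Int) = ((0:Nat):Int) by norm_num, PySem.List.pyGetD_natCast,
        List.getD_eq_getElem?_getD, List.getElem?_set_self (by simp)]
      rw [show (0:Int) = ((0:Nat):Int) by norm_num, PySem.List.pyGetD_natCast]
      rw [pvP_succ C 0 (by omega)]
      simp [pvP]
    · have h1m : 1 ≤ m := by omega
      obtain ⟨hlen, hIH⟩ := ih h1m (by omega)
      have hsplit : PySem.List.pyRange 1 ((m + 1 : Nat) : Int) 1
          = PySem.List.pyRange 1 (m : Int) 1 ++ [(m : Int)] := by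
        push_cast
        exact PySem.List.pyRange_one_succ_right (by exact_mod_cast h1m)
      rw [hsplit, List.foldl_append, List.foldl_cons, List.foldl_nil]
      set r := (PySem.List.pyRange 1 (m : Int) 1).foldl
          (fun p i => PySem.List.pySetD p i
            (PySem.List.pyGetD p (i - 1) 0 + PySem.List.pyGetD C i 0))
          (PySem.List.pySetD (List.replicate 26 (0 : Int)) 0 (PySem.List.pyGetD C 0 0)) with hr
      have hstep : PySem.List.pySetD r (m : Int)
            (PySem.List.pyGetD r ((m : Int) - 1) 0 + PySem.List.pyGetD C (m : Int) 0)
          = r.set m (pvP C (m + 1)) := by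
        have hm1 : ((m : Int) - 1) = ((m - 1 : Nat) : Int) := by push_cast [h1m]; ring
        rw [hm1, PySem.List.pyGetD_natCast, PySem.List.pySetD_natCast, PySem.List.pyGetD_natCast]
        have := hIH (m - 1) (by omega)
        rw [PySem.List.pyGetD_natCast] at this
        rw [this, show m - 1 + 1 = m by omega, ← pvP_succ C m (by omega)]
      rw [hstep]
      refine ⟨by simp [hlen], ?_⟩
      intro i hi
      rw [PySem.List.pyGetD_natCast, List.getD_eq_getElem?_getD]
      by_cases him : i = m
      · subst him
        rw [List.getElem?_set_self (by omega)]
        simp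
      · rw [List.getElem?_set_ne (by omega)]
        have := hIH i (by omega)
        rw [PySem.List.pyGetD_natCast, List.getD_eq_getElem?_getD] at this
        exact this

lemma inner_spec (ch : Char) (M : Int) :
    ∀ (js : List Int) (size : Int) (acc : List Char), size < M →
      getKthStringInner js ch M size acc =
        (size + min (js.length : Int) (M - size),
         acc ++ List.replicate (min (js.length : Int) (M - size)).toNat ch) := by
  intro js
  induction js with
  | nil =>
    intro size acc h
    have : min ((0:Int)) (M - size) = 0 := by omega
    simp [getKthStringInner, this]
  | cons x rest ih =>
    intro size acc h
    rw [getKthStringInner]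
    by_cases hb : size + 1 = M
    · have h1 : min (((x :: rest).length : Int)) (M - size) = 1 := by
        simp; omega
      simp only [hb, h1]
      have : (1:Int).toNat = 1 := rfl
      simp [← hb]
    · rw [if_neg hb, ih (size + 1) (acc ++ [ch]) (by omega)]
      have hlen : ((x :: rest).length : Int) = (rest.length : Int) + 1 := by simp
      have h3 : (min ((rest.length : Int)) (M - (size+1))).toNat + 1
          = (min (((x :: rest).length : Int)) (M - size)).toNat := by
        rw [hlen]; omega
      refine Prod.ext ?_ ?_
      · simp only [hlen]; omega
      · show acc ++ [ch] ++ List.replicate (min ((rest.length:Int)) (M - (size + 1))).toNat ch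
          = acc ++ List.replicate (min (((x :: rest).length : Int)) (M - size)).toNat ch
        rw [← h3, List.append_assoc, List.singleton_append, ← List.replicate_succ]

lemma pvRun_eq (C : List Int) (j : Nat) :
    pvRun C (j : Int) = List.replicate (C.getD j 0).toNat (Char.ofNat (97 + (j : Int)).toNat) := by
  simp [pvRun, PySem.List.pyGetD_natCast]

lemma pvS_nil (C : List Int) : pvS C ((26 : Nat) : Int) = [] := by
  rw [pvS, PySem.List.pyRange_one_eq_nil (by norm_num)]; rfl

lemma pvS_cons (C : List Int) (j : Nat) (hj : j < 26) :
    pvS C (j : Int) = pvRun C (j : Int) ++ pvS C ((j + 1 : Nat) : Int) := by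
  rw [pvS, PySem.List.pyRange_one_cons (by exact_mod_cast hj), List.map_cons, List.flatten_cons,
    pvS]
  push_cast
  rfl

lemma getD_nonneg (C : List Int) (hpos : ∀ x ∈ C, 0 ≤ x) (j : Nat) : 0 ≤ C.getD j 0 := by
  rw [List.getD_eq_getElem?_getD]
  cases hg : C[j]? with
  | none => simp
  | some y => simpa using hpos y (List.mem_of_getElem? hg)

lemma loop_phase2 (C pre : List Int) (h26 : C.length = 26) (hpos : ∀ x ∈ C, 0 ≤ x)
    (hpre : ∀ i : Nat, i < 26 → PySem.List.pyGetD pre (i : Int) 0 = pvP C (i + 1))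
    (M : Int) :
    ∀ (n j : Nat), j + n = 26 → 1 ≤ j → ∀ (st var size : Int) (acc : List Char),
      st ≤ pvP C j → var ≠ 0 → 0 ≤ size → size < M →
      getKthStringLoop (PySem.List.pyRange (j : Int) 26 1) pre C st M var size acc =
        acc ++ (pvS C j).take (M - size).toNat := by
  intro n
  induction n with
  | zero =>
    intro j hj _ st var size acc _ _ _ _
    have hj26 : j = 26 := by omega
    subst hj26
    rw [PySem.List.pyRange_one_eq_nil (by norm_num), getKthStringLoop, pvS_nil]
    simp
  | succ n ih =>
    intro j hj hj1 st var size acc hst hvar hsz hszM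
    have hjlt : j < 26 := by omega
    have hcast : ((j : Int) + 1) = ((j + 1 : Nat) : Int) := by push_cast; ring
    rw [PySem.List.pyRange_one_cons (by exact_mod_cast hjlt), getKthStringLoop]
    set cj := C.getD j 0 with hcj
    have hcj0 : 0 ≤ cj := getD_nonneg C hpos j
    have hpj : PySem.List.pyGetD pre (j : Int) 0 = pvP C (j + 1) := hpre j hjlt
    have hCj : PySem.List.pyGetD C (j : Int) 0 = cj := by
      rw [PySem.List.pyGetD_natCast]
    have hsucc : pvP C (j + 1) = pvP C j + cj := pvP_succ C j (by omega)
    have hnotlt : ¬ (PySem.List.pyGetD pre (j : Int) 0 < st) := by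
      rw [hpj]; omega
    by_cases hz : cj = 0
    · rw [if_pos (by rw [hCj]; exact Or.inr hz)]
      rw [hcast, ih (j + 1) (by omega) (by omega) st var size acc (by omega) hvar hsz hszM]
      rw [pvS_cons C j hjlt, pvRun_eq, show C.getD j 0 = 0 by rw [← hcj]; exact hz]
      simp
    · rw [if_neg (by rw [hCj]; push Not; exact ⟨by rw [hpj]; omega, hz⟩), if_neg hvar]
      have hm1 : ((j : Int) - 1) = ((j - 1 : Nat) : Int) := by push_cast [hj1]; ring
      have hpj1 : PySem.List.pyGetD pre ((j : Int) - 1) 0 = pvP C j := by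
        rw [hm1, hpre (j - 1) (by omega), show j - 1 + 1 = j by omega]
      have hcount : PySem.List.pyGetD pre (j : Int) 0 - PySem.List.pyGetD pre ((j : Int) - 1) 0 = cj := by
        rw [hpj, hpj1]; omega
      rw [hcount]
      have hlen : (((PySem.List.pyRange 0 cj 1).length : Int)) = cj := by
        rw [PySem.List.length_pyRange_one]; omega
      rw [inner_spec _ M _ size acc hszM, hlen]
      by_cases hbig : M - size ≤ cj
      · have hmin : min cj (M - size) = M - size := by omega
        rw [if_pos (by simp only [hmin]; ring)]
        simp only [hmin]
        rw [pvS_cons C j hjlt, pvRun_eq, List.take_append, List.take_replicate]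
        have h1 : min (M - size).toNat (cj.toNat) = (M - size).toNat := by omega
        have h2 : (M - size).toNat - (List.replicate cj.toNat (Char.ofNat (97 + (j:Int)).toNat)).length = 0 := by
          simp; omega
        rw [h1, h2]
        simp
      · have hmin : min cj (M - size) = cj := by omega
        rw [if_neg (by simp only [hmin]; omega)]
        simp only [hmin]
        rw [hcast, ih (j + 1) (by omega) (by omega) st var (size + cj) _ (by omega) hvar (by omega) (by omega)]
        rw [pvS_cons C j hjlt, pvRun_eq, List.take_append, List.take_replicate, List.append_assoc]
        have h1 : min (M - size).toNat cj.toNat = cj.toNat := by omega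
        have h2 : (M - size).toNat - (List.replicate cj.toNat (Char.ofNat (97 + (j:Int)).toNat)).length
            = (M - (size + cj)).toNat := by simp; omega
        rw [h1, h2]

lemma loop_phase1 (C pre : List Int) (h26 : C.length = 26) (hpos : ∀ x ∈ C, 0 ≤ x)
    (hpre : ∀ i : Nat, i < 26 → PySem.List.pyGetD pre (i : Int) 0 = pvP C (i + 1))
    (M : Int) (hM : 1 ≤ M) :
    ∀ (n j : Nat), j + n = 26 → ∀ (st : Int) (acc : List Char),
      pvP C j ≤ st →
      getKthStringLoop (PySem.List.pyRange (j : Int) 26 1) pre C st M 0 0 acc =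
        acc ++ (((pvS C j).drop (st - pvP C j).toNat).take M.toNat) := by
  intro n
  induction n with
  | zero =>
    intro j hj st acc _
    have hj26 : j = 26 := by omega
    subst hj26
    rw [PySem.List.pyRange_one_eq_nil (by norm_num), getKthStringLoop, pvS_nil]
    simp
  | succ n ih =>
    intro j hj st acc hst
    have hjlt : j < 26 := by omega
    have hcast : ((j : Int) + 1) = ((j + 1 : Nat) : Int) := by push_cast; ring
    rw [PySem.List.pyRange_one_cons (by exact_mod_cast hjlt), getKthStringLoop]
    set cj := C.getD j 0 with hcj
    have hcj0 : 0 ≤ cj := getD_nonneg C hpos j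
    have hpj : PySem.List.pyGetD pre (j : Int) 0 = pvP C (j + 1) := hpre j hjlt
    have hCj : PySem.List.pyGetD C (j : Int) 0 = cj := by rw [PySem.List.pyGetD_natCast]
    have hsucc : pvP C (j + 1) = pvP C j + cj := pvP_succ C j (by omega)
    have hrw : pvS C (j:Int) = List.replicate cj.toNat (Char.ofNat (97 + (j:Int)).toNat) ++ pvS C ((j+1 : Nat):Int) := by
      rw [pvS_cons C j hjlt, pvRun_eq, ← hcj]
    by_cases hskip : pvP C (j + 1) < st ∨ cj = 0
    · rw [if_pos (by rw [hCj, hpj]; exact hskip)]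
      have hle1 : pvP C (j + 1) ≤ st := by
        rcases hskip with h | h
        · omega
        · omega
      rw [hcast, ih (j + 1) (by omega) st acc hle1, hrw]
      rw [List.drop_append]
      have h1 : (st - pvP C j).toNat - (List.replicate cj.toNat (Char.ofNat (97 + (j:Int)).toNat)).length
          = (st - pvP C (j + 1)).toNat := by simp; omega
      have h2 : List.drop (st - pvP C j).toNat (List.replicate cj.toNat (Char.ofNat (97 + (j:Int)).toNat))
          = [] := by
        rw [List.drop_replicate]
        have : cj.toNat - (st - pvP C j).toNat = 0 := by omega
        rw [this]; rfl
      rw [h1, h2]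
      simp
    · push Not at hskip
      obtain ⟨hge, hz⟩ := hskip
      rw [if_neg (by rw [hCj, hpj]; push Not; exact ⟨by omega, hz⟩), if_pos rfl]
      simp only []
      have hvar' : PySem.List.pyGetD pre (j : Int) 0 - st = pvP C (j + 1) - st := by rw [hpj]
      rw [hvar']
      set v := pvP C (j + 1) - st with hv
      have hv0 : 0 ≤ v := by omega
      have hvcj : v ≤ cj := by omega
      have hlen : (((PySem.List.pyRange 0 v 1).length : Int)) = v := by
        rw [PySem.List.length_pyRange_one]; omega
      rw [inner_spec _ M _ 0 acc (by omega), hlen]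
      simp only [sub_zero, zero_add]
      -- st' = st - pvP C j;  v = cj - st'
      by_cases hbig : M ≤ v
      · have hmin : min v M = M := by omega
        rw [if_pos (by rw [hmin])]
        rw [hrw, List.drop_append, List.drop_replicate, List.take_append, List.take_replicate]
        have e1 : cj.toNat - (st - pvP C j).toNat = v.toNat := by omega
        have e2 : min M.toNat v.toNat = M.toNat := by omega
        have e3 : (st - pvP C j).toNat - (List.replicate cj.toNat (Char.ofNat (97 + (j:Int)).toNat)).length = 0 := by
          simp; omega
        have e4 : M.toNat - (List.replicate (cj.toNat - (st - pvP C j).toNat) (Char.ofNat (97 + (j:Int)).toNat)).length = 0 := by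
          simp; omega
        rw [e1] at e4 ⊢
        rw [e2, e3, e4]
        simp [hmin]
      · have hmin : min v M = v := by omega
        rw [if_neg (by rw [hmin]; omega)]
        simp only [hmin]
        by_cases hv0' : v = 0
        · -- stays in phase 1 (var' = 0, nothing appended)
          rw [hv0']
          have : pvP C (j + 1) ≤ st := by omega
          rw [hcast, ih (j + 1) (by omega) st (acc ++ List.replicate (0:Int).toNat (Char.ofNat (97 + (j:Int)).toNat)) this]
          rw [hrw, List.drop_append]
          have h1 : (st - pvP C j).toNat - (List.replicate cj.toNat (Char.ofNat (97 + (j:Int)).toNat)).length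
              = (st - pvP C (j + 1)).toNat := by simp; omega
          have h2 : List.drop (st - pvP C j).toNat (List.replicate cj.toNat (Char.ofNat (97 + (j:Int)).toNat)) = [] := by
            rw [List.drop_replicate]
            have : cj.toNat - (st - pvP C j).toNat = 0 := by omega
            rw [this]; rfl
          rw [h1, h2]
          simp
        · -- moves to phase 2 with size = v, var = v ≠ 0
          rw [hcast, loop_phase2 C pre h26 hpos hpre M n (j + 1) (by omega) (by omega) st v v _
            (by omega) hv0' (by omega) (by omega)]
          rw [hrw, List.drop_append, List.drop_replicate, List.take_append, List.take_replicate,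
            List.append_assoc]
          have e1 : cj.toNat - (st - pvP C j).toNat = v.toNat := by omega
          have e3 : (st - pvP C j).toNat - (List.replicate cj.toNat (Char.ofNat (97 + (j:Int)).toNat)).length = 0 := by
            simp; omega
          rw [e1, e3]
          have e2 : min M.toNat v.toNat = v.toNat := by omega
          have e4 : M.toNat - (List.replicate v.toNat (Char.ofNat (97 + (j:Int)).toNat)).length
              = (M - v).toNat := by simp; omega
          rw [e2, e4]
          simp

lemma slice_far (xs : List Char) (a b : Int) (h : (xs.length : Int) ≤ a) :
    PySem.List.slice xs (some a) (some b) = [] := by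
  show List.take (PySem.List.clampIdx xs.length b - PySem.List.clampIdx xs.length a)
      (List.drop (PySem.List.clampIdx xs.length a) xs) = []
  have ha : PySem.List.clampIdx xs.length a = xs.length := by
    unfold PySem.List.clampIdx
    split_ifs <;> omega
  have hb : PySem.List.clampIdx xs.length b ≤ xs.length := PySem.List.clampIdx_le _ _
  rw [ha, show PySem.List.clampIdx xs.length b - xs.length = 0 by omega]
  rfl

lemma sum_pySetD_le (xs : List Int) (i : Int) :
    (PySem.List.pySetD xs i (PySem.List.pyGetD xs i 0 + 1)).sum ≤ xs.sum + 1 := by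
  unfold PySem.List.pySetD PySem.List.pySet? PySem.List.pyGetD PySem.List.pyGet?
  cases hk : PySem.List.pyIdx? xs.length i with
  | none => simp
  | some k =>
    have hklt : k < xs.length := by
      unfold PySem.List.pyIdx? at hk
      split_ifs at hk <;> simp_all <;> omega
    simp only [Option.map_some, Option.bind_some, Option.getD_some]
    rw [List.sum_set]
    have hx : xs[k]? = some xs[k] := List.getElem?_eq_getElem hklt
    rw [hx]
    simp only [Option.getD_some, if_pos hklt]
    have hsplit : xs.sum = (xs.take k).sum + (xs.drop k).sum := by
      rw [← List.sum_append, List.take_append_drop]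
    have hdrop : (xs.drop k).sum = xs[k] + (xs.drop (k + 1)).sum := by
      conv_lhs => rw [List.drop_eq_getElem_cons hklt]
      rw [List.sum_cons]
    omega

lemma sum_foldl_le (l : List Int) (str : String) (init : List Int) :
    (l.foldl (fun acc i =>
        let idx : Int := (((PySem.Str.pyGet? str i).getD ' ').toNat : Int) - 97
        PySem.List.pySetD acc idx (PySem.List.pyGetD acc idx 0 + 1)) init).sum
      ≤ init.sum + (l.length : Int) := by
  induction l generalizing init with
  | nil => simp
  | cons y rest ih =>
    simp only [List.foldl_cons]
    calc _ ≤ _ := ih _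
    _ ≤ init.sum + ((y :: rest).length : Int) := by
        have := sum_pySetD_le init ((((PySem.Str.pyGet? str y).getD ' ').toNat : Int) - 97)
        simp only [List.length_cons]
        push_cast
        omega

lemma pvP_le_total (C : List Int) (hpos : ∀ x ∈ C, 0 ≤ x) (j : Nat) (hj : j ≤ C.length) :
    pvP C j ≤ C.sum := by
  have hsplit : C.sum = (C.take j).sum + (C.drop j).sum := by
    rw [← List.sum_append, List.take_append_drop]
  have hdp : 0 ≤ (C.drop j).sum :=
    List.sum_nonneg (by intro x hx; exact hpos x (List.mem_of_mem_drop hx))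
  unfold pvP
  omega

lemma pvS_len (C : List Int) (hpos : ∀ x ∈ C, 0 ≤ x) (h26 : C.length = 26) :
    ∀ (n j : Nat), j + n = 26 →
      ((pvS C (j : Int)).length : Int) ≤ pvP C 26 - pvP C j := by
  intro n
  induction n with
  | zero =>
    intro j hj
    have hj26 : j = 26 := by omega
    subst hj26
    rw [pvS_nil]
    simp
  | succ n ih =>
    intro j hj
    have hjlt : j < 26 := by omega
    have hcj : 0 ≤ C.getD j 0 := getD_nonneg C hpos j
    rw [pvS_cons C j hjlt, pvRun_eq]
    have := ih (j + 1) (by omega)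
    have hsucc : pvP C (j + 1) = pvP C j + C.getD j 0 := pvP_succ C j (by omega)
    simp only [List.length_append, List.length_replicate]
    push_cast at this ⊢
    omega

lemma loop_zero (pre C : List Int) (st M var size : Int)
    (hz : ∀ i : Nat, i < 26 → C.getD i 0 = 0) :
    ∀ (n j : Nat), j + n = 26 → ∀ (acc : List Char),
      getKthStringLoop (PySem.List.pyRange (j : Int) 26 1) pre C st M var size acc = acc := by
  intro n
  induction n with
  | zero =>
    intro j hj acc
    have hj26 : j = 26 := by omega
    subst hj26
    rw [PySem.List.pyRange_one_eq_nil (by norm_num), getKthStringLoop]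
  | succ n ih =>
    intro j hj acc
    have hjlt : j < 26 := by omega
    rw [PySem.List.pyRange_one_cons (by exact_mod_cast hjlt), getKthStringLoop,
      if_pos (Or.inr (by rw [PySem.List.pyGetD_natCast]; exact hz j hjlt))]
    rw [show ((j : Int) + 1) = ((j + 1 : Nat) : Int) by push_cast; ring]
    exact ih (j + 1) (by omega) acc

lemma loop_skip (pre C : List Int) (st M var size : Int) (acc : List Char)
    (hlt : ∀ i : Nat, i < 26 → PySem.List.pyGetD pre (i : Int) 0 < st) :
    ∀ (n j : Nat), j + n = 26 →
      getKthStringLoop (PySem.List.pyRange (j : Int) 26 1) pre C st M var size acc = acc := by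
  intro n
  induction n with
  | zero =>
    intro j hj
    have hj26 : j = 26 := by omega
    subst hj26
    rw [PySem.List.pyRange_one_eq_nil (by norm_num), getKthStringLoop]
  | succ n ih =>
    intro j hj
    have hjlt : j < 26 := by omega
    rw [PySem.List.pyRange_one_cons (by exact_mod_cast hjlt), getKthStringLoop,
      if_pos (Or.inl (hlt j hjlt))]
    rw [show ((j : Int) + 1) = ((j + 1 : Nat) : Int) by push_cast; ring]
    exact ih (j + 1) (by omega)

-- A = B when 1 ≤ K and 1 ≤ M (the main case)
lemma eq_pos (N M K : Int) (str : String) (hK : 1 ≤ K) (hM : 1 ≤ M) :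
    getKthString N M K str = getKthString_alt N M K str := by
  unfold getKthString getKthString_alt
  simp only []
  set C := (PySem.List.pyRange 0 N 1).foldl
      (fun acc i =>
        let idx : Int := (((PySem.Str.pyGet? str i).getD ' ').toNat : Int) - 97
        PySem.List.pySetD acc idx (PySem.List.pyGetD acc idx 0 + 1))
      (List.replicate 26 (0 : Int)) with hC
  obtain ⟨h26, hpos⟩ := counts_length_nonneg (PySem.List.pyRange 0 N 1) str
      (List.replicate 26 (0 : Int)) (by simp)
      (by intro x hx; rw [List.eq_of_mem_replicate hx])
  rw [← hC] at h26 hpos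
  have hpre26 := prefix_gen C h26 26 (by norm_num) (by norm_num)
  norm_cast at hpre26
  obtain ⟨-, hpre⟩ := hpre26
  set st : Int := (K - 1) * M with hst
  have hst0 : 0 ≤ st := by rw [hst]; exact mul_nonneg (by omega) (by omega)
  have hA := loop_phase1 C _ h26 hpos hpre M hM 26 0 (by norm_num) st [] (by simp [pvP]; exact hst0)
  norm_cast at hA
  rw [hA]
  have hs : pvS C 0 = ((PySem.List.pyRange 0 26 1).map
      (fun i => List.replicate (PySem.List.pyGetD C i 0).toNat (Char.ofNat (97 + i).toNat))).flatten := rfl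
  have hslice : PySem.List.slice (pvS C 0) (some st) (some (st + M))
      = List.take ((st + M).toNat - st.toNat) (List.drop st.toNat (pvS C 0)) :=
    PySem.List.slice_toNat _ hst0 (by omega)
  rw [← hs, hslice]
  have h1 : (st + M).toNat - st.toNat = M.toNat := by omega
  have h2 : (st - pvP C 0).toNat = st.toNat := by simp [pvP]
  rw [h1, h2]
  simp

-- nothing is counted when N ≤ 0: both sides give ""
lemma eq_empty (N M K : Int) (str : String) (hN : N ≤ 0) :
    getKthString N M K str = getKthString_alt N M K str := by
  unfold getKthString getKthString_alt
  simp only []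
  rw [PySem.List.pyRange_one_eq_nil hN]
  simp only [List.foldl_nil]
  have hlz := loop_zero (((PySem.List.pyRange 1 26 1).foldl
      (fun p i => PySem.List.pySetD p i
        (PySem.List.pyGetD p (i - 1) 0 + PySem.List.pyGetD (List.replicate 26 (0:Int)) i 0))
      (PySem.List.pySetD (List.replicate 26 (0:Int)) 0
        (PySem.List.pyGetD (List.replicate 26 (0:Int)) 0 0)))) (List.replicate 26 (0:Int))
      ((K - 1) * M) M 0 0 (by intro i hi; interval_cases i <;> rfl) 26 0 (by norm_num) []
  norm_cast at hlz
  rw [hlz]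
  have hs : ((PySem.List.pyRange 0 26 1).map
      (fun i => List.replicate (PySem.List.pyGetD (List.replicate 26 (0:Int)) i 0).toNat
        (Char.ofNat (97 + i).toNat))).flatten = ([] : List Char) := by decide
  rw [hs]
  simp [PySem.List.slice]

-- the start index lies past everything counted: both sides give ""
lemma eq_far (N M K : Int) (str : String) (h0 : 0 < N) (hfar : N < (K - 1) * M) :
    getKthString N M K str = getKthString_alt N M K str := by
  unfold getKthString getKthString_alt
  simp only []
  set C := (PySem.List.pyRange 0 N 1).foldl
      (fun acc i =>
        let idx : Int := (((PySem.Str.pyGet? str i).getD ' ').toNat : Int) - 97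
        PySem.List.pySetD acc idx (PySem.List.pyGetD acc idx 0 + 1))
      (List.replicate 26 (0 : Int)) with hC
  obtain ⟨h26, hpos⟩ := counts_length_nonneg (PySem.List.pyRange 0 N 1) str
      (List.replicate 26 (0 : Int)) (by simp)
      (by intro x hx; rw [List.eq_of_mem_replicate hx])
  rw [← hC] at h26 hpos
  have hpre26 := prefix_gen C h26 26 (by norm_num) (by norm_num)
  norm_cast at hpre26
  obtain ⟨-, hpre⟩ := hpre26
  have hsum : C.sum ≤ ((PySem.List.pyRange 0 N 1).length : Int) := by
    have := sum_foldl_le (PySem.List.pyRange 0 N 1) str (List.replicate 26 (0:Int))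
    rw [← hC] at this
    simpa using this
  have hlenN : ((PySem.List.pyRange 0 N 1).length : Int) ≤ N := by
    rw [PySem.List.length_pyRange_one]; omega
  have htot : pvP C 26 = C.sum := by
    unfold pvP; rw [List.take_of_length_le (le_of_eq h26)]
  have hst : (K - 1) * M > N := hfar
  have hls := loop_skip (((PySem.List.pyRange 1 26 1).foldl
      (fun p i => PySem.List.pySetD p i
        (PySem.List.pyGetD p (i - 1) 0 + PySem.List.pyGetD C i 0))
      (PySem.List.pySetD (List.replicate 26 (0:Int)) 0 (PySem.List.pyGetD C 0 0)))) C
      ((K - 1) * M) M 0 0 [] (by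
      intro i hi
      rw [hpre i hi]
      have h1 : pvP C (i + 1) ≤ C.sum := pvP_le_total C hpos (i + 1) (by omega)
      omega) 26 0 (by norm_num)
  norm_cast at hls
  rw [hls]
  have hsl : ((pvS C 0).length : Int) ≤ pvP C 26 - pvP C 0 := by
    have := pvS_len C hpos h26 26 0 (by norm_num)
    norm_cast at this
  have hzero : pvP C 0 = 0 := by simp [pvP]
  have hslice : PySem.List.slice (pvS C 0) (some ((K - 1) * M)) (some ((K - 1) * M + M)) = [] := by
    apply slice_far
    omega
  have hs : pvS C 0 = ((PySem.List.pyRange 0 26 1).map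
      (fun i => List.replicate (PySem.List.pyGetD C i 0).toNat (Char.ofNat (97 + i).toNat))).flatten := rfl
  rw [← hs, hslice]

-- ===== VERDICT (by name: the statement is the Claim_ definition above) =====
theorem getKthString_spec : Claim_equal_getKthString := by
  intro N M K str hDom hPre
  unfold Spec_getKthString
  obtain ⟨hN, hchars, hcase⟩ := hPre
  rcases hcase with ⟨hK, hM⟩ | h0 | hfar
  · exact eq_pos N M K str hK hM
  · exact eq_empty N M K str h0
  · rcases (by omega : N ≤ 0 ∨ 0 < N) with h0 | h0
    · exact eq_empty N M K str h0
    · exact eq_far N M K str h0 hfar
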